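-- pv_equiv track=rewrite | github.com/7VeDMaK/LoR-simulator | core/ranks.py | get_rank_info
-- ===== SOURCE A (Python) =====
-- RANK_THRESHOLDS = [
--     (0, "Крысы (Rats)", 0),
--     (6, "Слухи (Grade 9)", 1),
--     (12, "Городской Миф (Grade 8)", 2),
--     (18, "Городская Легенда (Grade 7)", 3),
--     (24, "Легенда+ (Grade 6)", 4),
--     (30, "Городская Чума (Grade 5)", 5),
--     (36, "Чума+ (Grade 4)", 6),
--     (43, "Городской Кошмар (Grade 3)", 7),
--     (50, "Кошмар+ (Grade 2)", 8),
--     (65, "Звезда Города (Grade 1)", 9),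
--     (80, "Звезда+ (Color)", 10),
--     (90, "Несовершенство (Impurity)", 11)
-- ]
--
-- def get_rank_info(level: int):
--     """Возвращает (Tier, Name) для заданного уровня."""
--     current_tier = 0
--     current_name = "Крысы"
--
--     for thresh, name, tier in RANK_THRESHOLDS:
--         if level >= thresh:
--             current_tier = tier
--             current_name = name
--         else:
--             break
--     return current_tier, current_name
-- ===== SOURCE B (Python) =====
-- import bisect
--
-- RANK_THRESHOLDS = [
--     (0, "Крысы (Rats)", 0),
--     (6, "Слухи (Grade 9)", 1),
--     (12, "Городской Миф (Grade 8)", 2),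
--     (18, "Городская Легенда (Grade 7)", 3),
--     (24, "Легенда+ (Grade 6)", 4),
--     (30, "Городская Чума (Grade 5)", 5),
--     (36, "Чума+ (Grade 4)", 6),
--     (43, "Городской Кошмар (Grade 3)", 7),
--     (50, "Кошмар+ (Grade 2)", 8),
--     (65, "Звезда Города (Grade 1)", 9),
--     (80, "Звезда+ (Color)", 10),
--     (90, "Несовершенство (Impurity)", 11)
-- ]
--
-- _THRESHOLDS = [t for t, _, _ in RANK_THRESHOLDS]
--
-- def get_rank_info(level: int):
--     """Возвращает (Tier, Name) для заданного уровня."""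
--     i = bisect.bisect_right(_THRESHOLDS, level) - 1
--     if i < 0:
--         return 0, "Крысы"
--     _, name, tier = RANK_THRESHOLDS[i]
--     return tier, name
-- ===== Notes on version B (the rewrite author's own statement) =====
-- stated objective: idiomatic
-- what changed: Replaced the linear scan-with-break over the threshold table by a binary search (bisect.bisect_right) on the precomputed threshold list, then a single table lookup.
import Mathlib
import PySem

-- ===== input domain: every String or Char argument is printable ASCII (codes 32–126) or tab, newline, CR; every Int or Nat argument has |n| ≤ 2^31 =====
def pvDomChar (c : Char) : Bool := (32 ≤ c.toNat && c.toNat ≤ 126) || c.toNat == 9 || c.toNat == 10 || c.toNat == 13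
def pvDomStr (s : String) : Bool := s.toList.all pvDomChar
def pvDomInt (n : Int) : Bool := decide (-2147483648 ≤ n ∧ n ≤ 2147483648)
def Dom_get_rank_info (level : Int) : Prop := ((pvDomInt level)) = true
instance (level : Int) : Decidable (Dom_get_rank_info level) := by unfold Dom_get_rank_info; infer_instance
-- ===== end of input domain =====

-- B replaces A's linear scan-with-break by a bisect_right binary search on the threshold list (idiomatic; same return values).

-- ===== PORT A =====
def RANK_THRESHOLDS : List (Int × String × Int) :=
  [(0, "Крысы (Rats)", 0),
   (6, "Слухи (Grade 9)", 1),
   (12, "Городской Миф (Grade 8)", 2),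
   (18, "Городская Легенда (Grade 7)", 3),
   (24, "Легенда+ (Grade 6)", 4),
   (30, "Городская Чума (Grade 5)", 5),
   (36, "Чума+ (Grade 4)", 6),
   (43, "Городской Кошмар (Grade 3)", 7),
   (50, "Кошмар+ (Grade 2)", 8),
   (65, "Звезда Города (Grade 1)", 9),
   (80, "Звезда+ (Color)", 10),
   (90, "Несовершенство (Impurity)", 11)]

-- A's for-loop with break: recursion over the table carrying (current_tier, current_name)
def rankLoop (level : Int) : List (Int × String × Int) → Int × String → Int × String
  | [], acc => acc
  | (thresh, name, tier) :: rest, acc =>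
    if level ≥ thresh then rankLoop level rest (tier, name) else acc

def get_rank_info (level : Int) : Int × String :=
  rankLoop level RANK_THRESHOLDS (0, "Крысы")

-- ===== PORT B =====
def pvThresholds : List Int := RANK_THRESHOLDS.map (fun r => r.1)

-- bisect.bisect_right(a, x) on [lo, hi); fuel only guards termination
def bisectRight : Nat → List Int → Int → Nat → Nat → Nat
  | 0, _, _, lo, _ => lo
  | fuel + 1, a, x, lo, hi =>
    if lo < hi then
      let mid := (lo + hi) / 2
      if x < a.getD mid 0 then bisectRight fuel a x lo mid
      else bisectRight fuel a x (mid + 1) hi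
    else lo

def get_rank_info_alt (level : Int) : Int × String :=
  let i : Int := (bisectRight 16 pvThresholds level 0 pvThresholds.length : Int) - 1
  if i < 0 then (0, "Крысы")
  else
    match RANK_THRESHOLDS.getD i.toNat (0, "", 0) with
    | (_, name, tier) => (tier, name)

-- ===== PRECONDITION & SPEC =====
def Spec_get_rank_info (level : Int) (out : Int × String) : Prop := out = get_rank_info_alt level
instance (level : Int) (out : Int × String) : Decidable (Spec_get_rank_info level out) := by unfold Spec_get_rank_info; infer_instance

-- ===== CLAIM (what is proved, stated in full; the proofs are below) =====
def Claim_equal_get_rank_info : Prop := ∀ (level : Int), Dom_get_rank_info level → Spec_get_rank_info level (get_rank_info level)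

-- ===== LEMMAS AND PROOFS =====

-- ===== VERDICT (by name: the statement is the Claim_ definition above) =====
set_option maxHeartbeats 1000000 in
theorem get_rank_info_spec : Claim_equal_get_rank_info := by
  intro level _
  unfold Spec_get_rank_info
  by_cases h0 : level < 0
  · have hb : bisectRight 16 pvThresholds level 0 pvThresholds.length = 0 := by
      simp [bisectRight, pvThresholds, RANK_THRESHOLDS]
      split_ifs <;> omega
    simp [get_rank_info, get_rank_info_alt, RANK_THRESHOLDS, rankLoop, hb, not_le.mpr h0]
  · by_cases h90 : 90 ≤ level
    · have hb : bisectRight 16 pvThresholds level 0 pvThresholds.length = 12 := by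
        simp [bisectRight, pvThresholds, RANK_THRESHOLDS]
        split_ifs <;> omega
      have h0' : (0:Int) ≤ level := by omega
      simp only [get_rank_info, get_rank_info_alt, RANK_THRESHOLDS, rankLoop, hb]
      norm_num
      split_ifs <;> first | rfl | omega
    · push Not at h0 h90
      interval_cases level <;> rfl
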